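-- pv_equiv track=rewrite | github.com/MattJTrueblood/sandbox | date_solver/date_solver.py | gregorian_days_from_year
-- ===== SOURCE A (Python) =====
-- def gregorian_days_from_year(year: int) -> int:
-- 	# leap years are every 4 years, skipping every 100 years, but not every 400 years.
--
-- 	# first, every 400 year period should have the same number of days.
-- 	num_400_years_blocks = (year - 1) // 400
-- 	days = num_400_years_blocks * (400 * 365 + 100 - 3)
--
-- 	# we can do the same for every 100 year period in the remainder
-- 	remaining_years = (year - 1) % 400
-- 	num_100_years_blocks = remaining_years // 100
-- 	days += num_100_years_blocks * (100 * 365 + 25 - 1)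
--
-- 	# and once again, for every 4 year period in the remainder of the 100 years block
-- 	remaining_years %= 100
-- 	num_4_years_blocks = remaining_years // 4
-- 	days += num_4_years_blocks * (4 * 365 + 1)
--
-- 	# finally, the remaining 0-3 days can be checked individually
-- 	remaining_years %= 4
-- 	for i in range(1, remaining_years + 1):
-- 		days += 366 if is_leap_year((year - 1) - remaining_years + i) else 365
--
-- 	return days
--
-- def is_leap_year(year):
-- 	return year % 4 == 0 and (year % 100 != 0 or year % 400 == 0)
-- ===== SOURCE B (Python) =====
-- def gregorian_days_from_year(year: int) -> int:
--     y = year - 1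
--     return y * 365 + y // 4 - y // 100 + y // 400
-- ===== Notes on version B (the rewrite author's own statement) =====
-- stated objective: simpler
-- what changed: Replaced the nested block decomposition plus a per-remaining-year leap-check loop by a single closed-form inclusion-exclusion expression over floor divisions, with no loop and no leap-year helper.
import Mathlib
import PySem

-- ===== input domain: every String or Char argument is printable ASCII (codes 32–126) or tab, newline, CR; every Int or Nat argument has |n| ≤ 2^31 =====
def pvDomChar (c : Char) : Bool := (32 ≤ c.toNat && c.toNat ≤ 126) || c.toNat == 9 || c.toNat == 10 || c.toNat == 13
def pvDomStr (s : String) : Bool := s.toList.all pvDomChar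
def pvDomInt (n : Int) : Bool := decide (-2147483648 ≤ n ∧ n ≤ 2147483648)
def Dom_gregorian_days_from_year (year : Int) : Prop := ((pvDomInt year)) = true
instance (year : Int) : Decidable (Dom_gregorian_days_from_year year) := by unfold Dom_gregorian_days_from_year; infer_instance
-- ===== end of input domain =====

-- B replaces A's 400/100/4-block decomposition and per-year loop by one closed-form formula (simpler).

-- ===== PORT A =====
def is_leap_year (year : Int) : Bool :=
  PySem.Int.mod year 4 == 0 && (PySem.Int.mod year 100 != 0 || PySem.Int.mod year 400 == 0)

def gregorian_days_from_year (year : Int) : Int :=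
  let num_400_years_blocks := PySem.Int.floordiv (year - 1) 400
  let days := num_400_years_blocks * (400 * 365 + 100 - 3)
  let remaining_years := PySem.Int.mod (year - 1) 400
  let num_100_years_blocks := PySem.Int.floordiv remaining_years 100
  let days := days + num_100_years_blocks * (100 * 365 + 25 - 1)
  let remaining_years := PySem.Int.mod remaining_years 100
  let num_4_years_blocks := PySem.Int.floordiv remaining_years 4
  let days := days + num_4_years_blocks * (4 * 365 + 1)
  let remaining_years := PySem.Int.mod remaining_years 4
  let days := (PySem.List.pyRange 1 (remaining_years + 1) 1).foldl
    (fun days i => days + (if is_leap_year ((year - 1) - remaining_years + i) then 366 else 365)) days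
  days

-- ===== PORT B =====
def gregorian_days_from_year_alt (year : Int) : Int :=
  let y := year - 1
  y * 365 + PySem.Int.floordiv y 4 - PySem.Int.floordiv y 100 + PySem.Int.floordiv y 400

-- ===== PRECONDITION & SPEC =====
def Spec_gregorian_days_from_year (year : Int) (out : Int) : Prop := out = gregorian_days_from_year_alt year
instance (year : Int) (out : Int) : Decidable (Spec_gregorian_days_from_year year out) := by unfold Spec_gregorian_days_from_year; infer_instance

-- ===== CLAIM (what is proved, stated in full; the proofs are below) =====
def Claim_equal_gregorian_days_from_year : Prop := ∀ (year : Int), Dom_gregorian_days_from_year year → Spec_gregorian_days_from_year year (gregorian_days_from_year year)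

-- ===== LEMMAS AND PROOFS =====

-- ===== VERDICT (by name: the statement is the Claim_ definition above) =====
theorem gregorian_days_from_year_spec : Claim_equal_gregorian_days_from_year := by
  intro year _
  unfold Spec_gregorian_days_from_year gregorian_days_from_year gregorian_days_from_year_alt
  simp only [PySem.Int.floordiv_eq_ediv_of_pos (show (0:Int) < 400 by norm_num),
    PySem.Int.floordiv_eq_ediv_of_pos (show (0:Int) < 100 by norm_num),
    PySem.Int.floordiv_eq_ediv_of_pos (show (0:Int) < 4 by norm_num),
    PySem.Int.mod_eq_emod_of_pos (show (0:Int) < 400 by norm_num),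
    PySem.Int.mod_eq_emod_of_pos (show (0:Int) < 100 by norm_num),
    PySem.Int.mod_eq_emod_of_pos (show (0:Int) < 4 by norm_num)]
  set r : Int := (year - 1) % 400 % 100 % 4 with hr
  have hcase : r = 0 ∨ r = 1 ∨ r = 2 ∨ r = 3 := by omega
  have hleap : ∀ i : Int, 0 < i → i < 4 →
      is_leap_year (year - 1 - r + i) = false := by
    intro i h1 h2
    simp only [is_leap_year, PySem.Int.mod_eq_emod_of_pos (show (0:Int) < 4 by norm_num),
      PySem.Int.mod_eq_emod_of_pos (show (0:Int) < 100 by norm_num),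
      PySem.Int.mod_eq_emod_of_pos (show (0:Int) < 400 by norm_num),
      Bool.and_eq_false_iff, beq_eq_false_iff_ne, ne_eq]
    left
    omega
  rcases hcase with h | h | h | h <;> simp only [h] at hleap ⊢
  · rw [show PySem.List.pyRange 1 (0+1) 1 = [] from by decide]
    simp only [List.foldl]
    omega
  · rw [show PySem.List.pyRange 1 (1+1) 1 = [1] from by decide]
    simp only [List.foldl, hleap 1 (by norm_num) (by norm_num), Bool.false_eq_true, if_false]
    omega
  · rw [show PySem.List.pyRange 1 (2+1) 1 = [1, 2] from by decide]
    simp only [List.foldl, hleap 1 (by norm_num) (by norm_num),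
      hleap 2 (by norm_num) (by norm_num), Bool.false_eq_true, if_false]
    omega
  · rw [show PySem.List.pyRange 1 (3+1) 1 = [1, 2, 3] from by decide]
    simp only [List.foldl, hleap 1 (by norm_num) (by norm_num),
      hleap 2 (by norm_num) (by norm_num), hleap 3 (by norm_num) (by norm_num),
      Bool.false_eq_true, if_false]
    omega
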